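-- pv_equiv track=rewrite | github.com/915dbfl/youlAlgorithm | python/zip/simulation/[2023 카카오 블라인드] 표현 가능한 이진트리.py | check_child
-- ===== SOURCE A (Python) =====
-- from collections import deque
--
-- def check_child(b):
--     dq = deque()
--     des = ((len(b)+1)//2)//2
--     dq.append(((len(b)+1)// 2, des))
--
--     while dq:
--         cur, d = dq.popleft()
--         # 잎이 아닌 경우
--         if cur % 2 == 0:
--             if b[cur-1] == "0" and (b[cur - d -1] == "1" or b[cur + d - 1] == "1"):
--                 return False
--
--             dq.append((cur-d, d//2))
--             dq.append((cur+d, d//2))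
--     return True
-- ===== SOURCE B (Python) =====
-- def check_child(b):
--     def helper(cur, d):
--         if cur % 2 == 1:
--             return True
--         if b[cur - 1] == "0" and (b[cur - d - 1] == "1" or b[cur + d - 1] == "1"):
--             return False
--         return helper(cur - d, d // 2) and helper(cur + d, d // 2)
--     root = (len(b) + 1) // 2
--     return helper(root, root // 2)
-- ===== Notes on version B (the rewrite author's own statement) =====
-- stated objective: simpler
-- what changed: Replaced the deque-based BFS loop over (cur, d) pairs with a short recursive DFS helper that checks a node and conjoins the results of its two subtrees directly.
import Mathlib
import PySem

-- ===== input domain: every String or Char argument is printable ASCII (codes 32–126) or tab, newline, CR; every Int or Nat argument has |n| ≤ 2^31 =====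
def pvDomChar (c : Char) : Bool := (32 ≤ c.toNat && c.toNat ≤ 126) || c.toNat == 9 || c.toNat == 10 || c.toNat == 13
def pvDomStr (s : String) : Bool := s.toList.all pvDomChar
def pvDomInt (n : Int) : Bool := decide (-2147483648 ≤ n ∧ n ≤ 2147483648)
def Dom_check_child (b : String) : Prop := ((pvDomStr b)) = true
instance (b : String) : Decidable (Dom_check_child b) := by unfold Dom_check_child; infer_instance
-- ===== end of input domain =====

-- B replaces A's deque BFS with a recursive DFS over the tree of (cur, d) states (simpler); same values, same IndexError on "".


-- ===== PORT A =====
-- termination measure for the BFS queue: each popped pair (cur, d) weighs (d+1)^2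
def pvMeasQ (q : List (Int × Nat)) : Nat := (q.map (fun p => (p.2 + 1) ^ 2)).sum

theorem pvMeasQ_step (d : Nat) (hd : d ≠ 0) : 2 * (d / 2 + 1) ^ 2 < (d + 1) ^ 2 := by
  obtain ⟨k, hk | hk⟩ : ∃ k, d = 2 * k ∨ d = 2 * k + 1 := ⟨d / 2, by omega⟩
  · have hk2 : d / 2 = k := by omega
    have hk1 : 1 ≤ k := by omega
    subst hk; rw [hk2]; nlinarith
  · have hk2 : d / 2 = k := by omega
    subst hk; rw [hk2]; nlinarith

-- the while-loop over the deque; popleft = head, append = ++ at the back.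
-- Totality guard `d = 0`: a popped pair with even cur and d = 0 only arises for b = "", where
-- the Python raises IndexError on b[cur-1] before re-enqueueing (and the gets below are none).
def loopA (b : String) (q : List (Int × Nat)) : Bool :=
  match q with
  | [] => true
  | (cur, d) :: rest =>
    if PySem.Int.mod cur 2 == 0 then
      match PySem.Str.pyGet? b (cur - 1), PySem.Str.pyGet? b (cur - (d : Int) - 1),
            PySem.Str.pyGet? b (cur + (d : Int) - 1) with
      | some c0, some cl, some cr =>
        if c0 == '0' && (cl == '1' || cr == '1') then false
        else if hd : d = 0 then loopA b rest
        else loopA b (rest ++ [(cur - (d : Int), d / 2), (cur + (d : Int), d / 2)])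
      | _, _, _ => false   -- IndexError in Python: excluded by Pre_
    else loopA b rest
termination_by pvMeasQ q
decreasing_by
  all_goals simp [pvMeasQ]
  have := pvMeasQ_step d hd; omega
def check_child (b : String) : Bool :=
  let root : Nat := (b.toList.length + 1) / 2
  let des : Nat := root / 2
  loopA b [((root : Int), des)]

-- ===== PORT B =====
def altHelper (b : String) (cur : Int) (d : Nat) : Bool :=
  if PySem.Int.mod cur 2 == 1 then true
  else
    match PySem.Str.pyGet? b (cur - 1), PySem.Str.pyGet? b (cur - (d : Int) - 1),
          PySem.Str.pyGet? b (cur + (d : Int) - 1) with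
    | some c0, some cl, some cr =>
      if c0 == '0' && (cl == '1' || cr == '1') then false
      else if hd : d = 0 then true   -- totality guard, unreachable for b ≠ "" (Python raises on "" before recursing)
      else altHelper b (cur - (d : Int)) (d / 2) && altHelper b (cur + (d : Int)) (d / 2)
    | _, _, _ => false   -- IndexError in Python: excluded by Pre_
termination_by d
decreasing_by all_goals omega

def check_child_alt (b : String) : Bool :=
  let root : Nat := (b.toList.length + 1) / 2
  altHelper b (root : Int) (root / 2)

-- ===== PRECONDITION & SPEC =====
-- Pre_ excludes only the empty string, on which the Python A (and B) raises IndexError at b[cur-1].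
def Pre_check_child (b : String) : Prop := b ≠ ""
instance (b : String) : Decidable (Pre_check_child b) := by unfold Pre_check_child; infer_instance
def pvWitness_check_child : String := "1"

def Spec_check_child (b : String) (out : Bool) : Prop := out = check_child_alt b
instance (b : String) (out : Bool) : Decidable (Spec_check_child b out) := by unfold Spec_check_child; infer_instance

-- ===== CLAIM (what is proved, stated in full; the proofs are below) =====
def Claim_equal_check_child : Prop := ∀ (b : String), Dom_check_child b → Pre_check_child b → Spec_check_child b (check_child b)

-- ===== LEMMAS AND PROOFS =====
theorem altHelper_even (b : String) (cur : Int) (d : Nat)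
    (h : PySem.Int.mod cur 2 = 0) (c0 cl cr : Char)
    (h0 : PySem.Str.pyGet? b (cur - 1) = some c0)
    (hl : PySem.Str.pyGet? b (cur - (d : Int) - 1) = some cl)
    (hr : PySem.Str.pyGet? b (cur + (d : Int) - 1) = some cr) :
    altHelper b cur d =
      if c0 == '0' && (cl == '1' || cr == '1') then false
      else if d = 0 then true
      else altHelper b (cur - (d : Int)) (d / 2) && altHelper b (cur + (d : Int)) (d / 2) := by
  rw [altHelper, h0, hl, hr, h]
  simp

theorem altHelper_even_none (b : String) (cur : Int) (d : Nat)
    (h : PySem.Int.mod cur 2 = 0)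
    (hx : ∀ (c0 cl cr : Char), PySem.Str.pyGet? b (cur - 1) = some c0 →
      PySem.Str.pyGet? b (cur - (d : Int) - 1) = some cl →
      PySem.Str.pyGet? b (cur + (d : Int) - 1) = some cr → False) :
    altHelper b cur d = false := by
  rw [altHelper, h]
  rcases h0 : PySem.Str.pyGet? b (cur - 1) with _ | c0 <;>
    rcases hl : PySem.Str.pyGet? b (cur - (d : Int) - 1) with _ | cl <;>
      rcases hr : PySem.Str.pyGet? b (cur + (d : Int) - 1) with _ | cr
  all_goals first
    | exact (hx _ _ _ h0 hl hr).elim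
    | simp

theorem altHelper_odd (b : String) (cur : Int) (d : Nat)
    (h : PySem.Int.mod cur 2 ≠ 0) : altHelper b cur d = true := by
  have h2 := PySem.Int.mod_nonneg cur (b := 2) (by omega)
  have h3 := PySem.Int.mod_lt cur (b := 2) (by omega)
  have h1 : PySem.Int.mod cur 2 = 1 := by omega
  rw [altHelper, h1]
  simp

theorem loopA_eq_all (b : String) (q : List (Int × Nat)) :
    loopA b q = q.all (fun p => altHelper b p.1 p.2) := by
  fun_induction loopA b q with
  | case1 => simp
  | case2 cur d rest hmod c0 cl cr hcr hcl hc0 hchk =>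
    simp only [List.all_cons]
    rw [altHelper_even b cur d (by simpa using hmod) c0 cl cr hc0 hcl hcr]
    simp [hchk]
  | case3 cur rest hmod c0 cl cr hc0 hchk hcr hcl ih =>
    simp only [List.all_cons, ih]
    rw [altHelper_even b cur 0 (by simpa using hmod) c0 cl cr hc0 hcl hcr]
    simp [hchk]
  | case4 cur d rest hmod c0 cl cr hcr hcl hc0 hchk hd ih =>
    rw [ih]
    simp only [List.all_cons, List.all_append]
    rw [altHelper_even b cur d (by simpa using hmod) c0 cl cr hc0 hcl hcr]
    simp [hchk, hd, Bool.and_assoc, Bool.and_comm]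
  | case5 cur d rest hmod hx =>
    simp only [List.all_cons]
    rw [altHelper_even_none b cur d (by simpa using hmod) hx]
    simp
  | case6 cur d rest hmod ih =>
    simp only [List.all_cons, ih, altHelper_odd b cur d (by simpa using hmod)]
    simp

-- ===== VERDICT (by name: the statement is the Claim_ definition above) =====
theorem check_child_spec : Claim_equal_check_child := by
  intro b _ _
  unfold Spec_check_child check_child check_child_alt
  simp [loopA_eq_all]
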